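-- pv_equiv track=rewrite | github.com/zfergus/seam-erasure | src/seam_loops.py | find_edge_loops
-- ===== SOURCE A (Python) =====
-- def find_edge_loops(bag_of_edges):
--     """ Find the edge loops given an unsorted 1D list of edges """
--     if(len(bag_of_edges) == 0):
--         return []
--
--     # Create edge loops from bag_of_edges
--     currentEdge = bag_of_edges.pop(0)
--     currentLoop = 0
--     edge_loops = [[currentEdge]]
--     while len(bag_of_edges) > 0:
--         nextEdge = None
--         # Loop over the remaining edges and find the next edge
--         for i, edge in enumerate(bag_of_edges):
--             if(currentEdge[1] == edge[0]):
--                 nextEdge = bag_of_edges.pop(i)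
--                 break
--
--         # Store the found edge in the current seam loop
--         if(nextEdge):
--             edge_loops[currentLoop].append(nextEdge)
--
--         # Initialize the next seam loop if needed
--         if len(bag_of_edges) > 0 and ((nextEdge is None) or
--                 nextEdge[1] == edge_loops[currentLoop][0][0]):
--             currentEdge = bag_of_edges.pop(0)
--             edge_loops.append([currentEdge])
--             currentLoop += 1
--         # Increment the currentEdge
--         elif(len(bag_of_edges) > 0):
--             currentEdge = nextEdge
--
--     return edge_loops
-- ===== SOURCE B (Python) =====
-- def find_edge_loops(bag_of_edges):
--     """ Find the edge loops given an unsorted 1D list of edges.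
--     Faster rework: edges are indexed once by start-vertex (queues in original
--     order), so the next edge of a chain is found in O(1) instead of a scan.
--     Unlike the original, the input list is NOT consumed (no mutation). """
--     n = len(bag_of_edges)
--     if n == 0:
--         return []
--
--     # Queues of edge indices per start-vertex; built backwards so that the
--     # smallest (= first remaining) index sits at the *end* and pop() is O(1).
--     by_start = {}
--     for i in range(n - 1, -1, -1):
--         by_start.setdefault(bag_of_edges[i][0], []).append(i)
--
--     used = [False] * n
--
--     def take(v):
--         """Pop the first still-unused edge starting at vertex v, or None."""
--         q = by_start.get(v)
--         if q is None:
--             return None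
--         while q:
--             i = q.pop()
--             if not used[i]:
--                 used[i] = True
--                 return bag_of_edges[i]
--         return None
--
--     loops = []
--     p = 0  # scan pointer for the next loop's starting edge
--     while p < n:
--         if used[p]:
--             p += 1
--             continue
--         used[p] = True
--         start = bag_of_edges[p]
--         loop = [start]
--         cur = start
--         while True:
--             nxt = take(cur[1])
--             if nxt is None:
--                 break
--             loop.append(nxt)
--             if nxt[1] == start[0]:
--                 break
--             cur = nxt
--         loops.append(loop)
--         p += 1
--     return loops
-- ===== Notes on version B (the rewrite author's own statement) =====
-- stated objective: faster
-- what changed: Replaced the quadratic inner scan (and repeated pop(i) re-shuffling of the remaining bag) by a one-pass index of the edges: per-start-vertex queues of edge indices plus a used[] array and a monotone scan pointer, so each next-edge lookup and each new-loop start is amortized O(1); the input list is no longer mutated.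
import Mathlib
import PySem

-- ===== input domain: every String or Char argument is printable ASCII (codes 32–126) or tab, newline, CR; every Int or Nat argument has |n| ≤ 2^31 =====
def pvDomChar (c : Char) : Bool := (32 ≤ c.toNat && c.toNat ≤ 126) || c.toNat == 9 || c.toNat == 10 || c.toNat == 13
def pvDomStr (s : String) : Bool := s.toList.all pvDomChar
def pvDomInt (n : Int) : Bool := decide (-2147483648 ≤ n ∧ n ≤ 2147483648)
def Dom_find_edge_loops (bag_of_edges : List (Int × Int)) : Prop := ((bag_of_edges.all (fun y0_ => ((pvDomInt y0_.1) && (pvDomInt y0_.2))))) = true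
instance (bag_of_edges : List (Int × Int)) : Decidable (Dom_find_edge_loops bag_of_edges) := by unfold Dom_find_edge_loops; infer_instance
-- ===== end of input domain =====

-- B replaces A's quadratic inner scan by per-start-vertex index queues plus a
-- used[] array (amortized O(1) next-edge lookup); return values are proved
-- equal.  NOTE: A empties the input list in place (pop); B does not mutate it —
-- the equivalence proved here is about the RETURN value only.

-- ===== PORT A =====
-- the inner `for i, edge in enumerate(bag_of_edges): if currentEdge[1] == edge[0]:
-- nextEdge = bag_of_edges.pop(i); break` — first matching edge and the bag without it
def findNextA (cur : Int × Int) : List (Int × Int) → Option ((Int × Int) × List (Int × Int))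
  | [] => none
  | e :: rest =>
      if cur.2 = e.1 then some (e, rest)
      else match findNextA cur rest with
           | none => none
           | some (f, r) => some (f, e :: r)

-- termination fact for the while loop below (cited by `decreasing_by`)
lemma findNextA_length (cur : Int × Int) (bag : List (Int × Int)) (f : Int × Int)
    (r : List (Int × Int)) (h : findNextA cur bag = some (f, r)) : r.length + 1 = bag.length := by
  induction bag generalizing r with
  | nil => simp [findNextA] at h
  | cons e rest ih =>
    simp only [findNextA] at h
    split at h
    · cases h; rfl
    · cases hh : findNextA cur rest with
      | none => rw [hh] at h; cases h
      | some p =>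
        obtain ⟨f', r'⟩ := p
        rw [hh] at h
        cases h
        have := ih r' hh
        simp [← this]

-- the `while len(bag_of_edges) > 0` loop; `edge_loops` is carried as the finished
-- loops `done` plus the current loop `curLoop` (= edge_loops[currentLoop], the last one)
def loopA (cur : Int × Int) (done : List (List (Int × Int))) (curLoop : List (Int × Int)) :
    List (Int × Int) → List (List (Int × Int))
  | [] => done ++ [curLoop]
  | e0 :: bag0 =>
    match h : findNextA cur (e0 :: bag0) with
    | none => loopA e0 (done ++ [curLoop]) [e0] bag0
    | some (nxt, rest) =>
      match rest with
      | [] => done ++ [curLoop ++ [nxt]]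
      | e1 :: r1 =>
        if nxt.2 = ((curLoop ++ [nxt]).headD (0, 0)).1 then
          loopA e1 (done ++ [curLoop ++ [nxt]]) [e1] r1
        else loopA nxt done (curLoop ++ [nxt]) (e1 :: r1)
termination_by bag => bag.length
decreasing_by
  · simp
  · have := findNextA_length cur (e0 :: bag0) nxt (e1 :: r1) h; simp at this ⊢; omega
  · have := findNextA_length cur (e0 :: bag0) nxt (e1 :: r1) h; simp at this ⊢; omega

def find_edge_loops (bag_of_edges : List (Int × Int)) : List (List (Int × Int)) :=
  match bag_of_edges with
  | [] => []
  | e :: rest => loopA e [] [e] rest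

-- ===== PORT B =====
-- `for i in range(n - 1, -1, -1): by_start.setdefault(bag_of_edges[i][0], []).append(i)`
-- (called with the index list (range n).reverse = [n-1, …, 0])
def buildIdxB (bag : List (Int × Int)) (d : PySem.Dict Int (List Nat)) :
    List Nat → PySem.Dict Int (List Nat)
  | [] => d
  | i :: is => buildIdxB bag
      (d.insert (bag.getD i (0, 0)).1 (d.getD (bag.getD i (0, 0)).1 [] ++ [i])) is

-- `take(v)`: pop indices from the end of the queue until an unused one is found;
-- returns (found edge or none, remaining queue, updated used[])
def takeB (bag : List (Int × Int)) (used : List Bool) (q : List Nat) :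
    Option (Int × Int) × List Nat × List Bool :=
  match hq : q.getLast? with
  | none => (none, q, used)
  | some i =>
      if used.getD i false then takeB bag used q.dropLast
      else (some (bag.getD i (0, 0)), q.dropLast, used.set i true)
termination_by q.length
decreasing_by
  have hne : q ≠ [] := by intro hn; subst hn; simp at hq
  have := List.length_pos_iff.mpr hne
  simp [List.length_dropLast]; omega

-- the inner `while True` chain loop (fuel-guarded only to make the same
-- computation total; fuel = n always suffices, as the proofs below show)
def chainB (bag : List (Int × Int)) (startv : Int) :
    Nat → Int × Int → List (Int × Int) → PySem.Dict Int (List Nat) → List Bool →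
    List (Int × Int) × PySem.Dict Int (List Nat) × List Bool
  | 0, _, loopAcc, d, used => (loopAcc, d, used)
  | fuel + 1, cur, loopAcc, d, used =>
      match takeB bag used (d.getD cur.2 []) with
      | (none, q', used') => (loopAcc, d.insert cur.2 q', used')
      | (some e, q', used') =>
          if e.2 = startv then (loopAcc ++ [e], d.insert cur.2 q', used')
          else chainB bag startv fuel e (loopAcc ++ [e]) (d.insert cur.2 q') used'

-- the outer `while p < n` loop over the scan pointer p
def outerB (bag : List (Int × Int)) (n : Nat) :
    Nat → PySem.Dict Int (List Nat) → List Bool → List (List (Int × Int)) →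
    List (List (Int × Int))
  | p, d, used, loops =>
    if _h : p < n then
      if used.getD p false then outerB bag n (p + 1) d used loops
      else
        let start := bag.getD p (0, 0)
        let res := chainB bag start.1 n start [start] d (used.set p true)
        outerB bag n (p + 1) res.2.1 res.2.2 (loops ++ [res.1])
    else loops
termination_by p => n - p
decreasing_by all_goals omega

def find_edge_loops_alt (bag_of_edges : List (Int × Int)) : List (List (Int × Int)) :=
  if bag_of_edges.length = 0 then []
  else
    outerB bag_of_edges bag_of_edges.length 0
      (buildIdxB bag_of_edges PySem.Dict.empty (List.range bag_of_edges.length).reverse)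
      (List.replicate bag_of_edges.length false) []

-- ===== PRECONDITION & SPEC =====
def Spec_find_edge_loops (bag_of_edges : List (Int × Int)) (out : List (List (Int × Int))) : Prop := out = find_edge_loops_alt bag_of_edges
instance (bag_of_edges : List (Int × Int)) (out : List (List (Int × Int))) : Decidable (Spec_find_edge_loops bag_of_edges out) := by unfold Spec_find_edge_loops; infer_instance

-- ===== CLAIM (what is proved, stated in full; the proofs are below) =====
def Claim_equal_find_edge_loops : Prop := ∀ (bag_of_edges : List (Int × Int)), Dom_find_edge_loops bag_of_edges → Spec_find_edge_loops bag_of_edges (find_edge_loops bag_of_edges)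

-- ===== LEMMAS AND PROOFS =====

-- start vertex of edge number i
def stv (bag : List (Int × Int)) (i : Nat) : Int := (bag.getD i (0, 0)).1
-- indices of the edges not yet consumed, in original order
def unusedIdx (used : List Bool) : List Nat :=
  (List.range used.length).filter (fun i => !used.getD i false)
-- the remaining bag, as A sees it
def remE (bag : List (Int × Int)) (used : List Bool) : List (Int × Int) :=
  (unusedIdx used).map (fun i => bag.getD i (0, 0))
-- remaining edge indices starting at vertex v, in original order
def matchesI (bag : List (Int × Int)) (used : List Bool) (v : Int) : List Nat :=
  (unusedIdx used).filter (fun i => stv bag i = v)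
def numUnused (used : List Bool) : Nat := (unusedIdx used).length

-- invariant of one queue of B's index
def InvQ (bag : List (Int × Int)) (used : List Bool) (v : Int) (q : List Nat) : Prop :=
  q.Nodup ∧ (∀ i ∈ q, i < used.length ∧ stv bag i = v) ∧
    q.reverse.filter (fun i => !used.getD i false) = matchesI bag used v
-- invariant of B's whole state
def InvB (bag : List (Int × Int)) (d : PySem.Dict Int (List Nat)) (used : List Bool) : Prop :=
  ∀ v, InvQ bag used v (d.getD v [])

-- what A computes from the remaining bag (loops still to be produced)
def AloopsFrom (bag : List (Int × Int)) (used : List Bool) : List (List (Int × Int)) :=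
  match remE bag used with
  | [] => []
  | e :: rest => loopA e [] [e] rest




lemma loopA_nil (cur : Int × Int) (done : List (List (Int × Int))) (curLoop : List (Int × Int)) :
    loopA cur done curLoop [] = done ++ [curLoop] := by rw [loopA]

lemma loopA_cons_none (cur e0 : Int × Int) (done : List (List (Int × Int)))
    (curLoop : List (Int × Int)) (bag0 : List (Int × Int))
    (h : findNextA cur (e0 :: bag0) = none) :
    loopA cur done curLoop (e0 :: bag0) = loopA e0 (done ++ [curLoop]) [e0] bag0 := by
  rw [loopA]
  split
  · rfl
  · next nxt' rest' heq => rw [heq] at h; cases h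

lemma loopA_cons_some_nil (cur e0 nxt : Int × Int) (done : List (List (Int × Int)))
    (curLoop : List (Int × Int)) (bag0 : List (Int × Int))
    (h : findNextA cur (e0 :: bag0) = some (nxt, [])) :
    loopA cur done curLoop (e0 :: bag0) = done ++ [curLoop ++ [nxt]] := by
  rw [loopA]
  split
  · next heq => rw [heq] at h; cases h
  · next nxt' rest' heq =>
    rw [heq] at h
    simp only [Option.some.injEq, Prod.mk.injEq] at h
    obtain ⟨rfl, rfl⟩ := h
    rfl

lemma loopA_cons_some_cons (cur e0 nxt e1 : Int × Int) (done : List (List (Int × Int)))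
    (curLoop : List (Int × Int)) (bag0 r1 : List (Int × Int))
    (h : findNextA cur (e0 :: bag0) = some (nxt, e1 :: r1)) :
    loopA cur done curLoop (e0 :: bag0) =
      if nxt.2 = ((curLoop ++ [nxt]).headD (0, 0)).1 then
        loopA e1 (done ++ [curLoop ++ [nxt]]) [e1] r1
      else loopA nxt done (curLoop ++ [nxt]) (e1 :: r1) := by
  rw [loopA]
  split
  · next heq => rw [heq] at h; cases h
  · next nxt' rest' heq =>
    rw [heq] at h
    simp only [Option.some.injEq, Prod.mk.injEq] at h
    obtain ⟨rfl, rfl⟩ := h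
    rfl

-- accumulator lemma
lemma loopA_acc (bag : List (Int × Int)) : ∀ (cur : Int × Int) (done : List (List (Int × Int)))
    (curLoop : List (Int × Int)),
    loopA cur done curLoop bag = done ++ loopA cur [] curLoop bag := by
  induction hn : bag.length using Nat.strong_induction_on generalizing bag with
  | _ n ih =>
  intro cur done curLoop
  match bag with
  | [] => simp [loopA_nil]
  | e0 :: bag0 =>
    cases hf : findNextA cur (e0 :: bag0) with
    | none =>
      rw [loopA_cons_none _ _ _ _ _ hf, loopA_cons_none _ _ _ _ _ hf]
      have hb : bag0.length < n := by simp at hn; omega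
      rw [ih bag0.length hb bag0 rfl e0 (done ++ [curLoop]), ih bag0.length hb bag0 rfl e0 ([] ++ [curLoop])]
      simp
    | some p =>
      obtain ⟨nxt, rest⟩ := p
      have hlen := findNextA_length cur (e0 :: bag0) nxt rest hf
      cases rest with
      | nil => rw [loopA_cons_some_nil _ _ _ _ _ _ hf, loopA_cons_some_nil _ _ _ _ _ _ hf]; simp
      | cons e1 r1 =>
        rw [loopA_cons_some_cons _ _ _ _ _ _ _ _ hf, loopA_cons_some_cons _ _ _ _ _ _ _ _ hf]
        have h1 : r1.length < n := by simp at hlen hn; omega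
        have h2 : (e1 :: r1).length < n := by simp at hlen hn; simp; omega
        split
        · rw [ih r1.length h1 r1 rfl e1 (done ++ [curLoop ++ [nxt]]),
              ih r1.length h1 r1 rfl e1 ([] ++ [curLoop ++ [nxt]])]
          simp
        · rw [ih (e1 :: r1).length h2 (e1 :: r1) rfl nxt done,
              ih (e1 :: r1).length h2 (e1 :: r1) rfl nxt []]

-- ---------- basic facts about used[] and the derived index lists ----------
lemma getD_set_bool (used : List Bool) (i j : Nat) (hi : i < used.length) :
    (used.set i true).getD j false = if j = i then true else used.getD j false := by
  simp only [List.getD_eq_getElem?_getD, List.getElem?_set]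
  by_cases h : j = i
  · subst h; simp [hi]
  · have h2 : ¬ i = j := fun hh => h hh.symm
    simp [h2, h]

lemma unusedIdx_set (used : List Bool) (i : Nat) (hi : i < used.length) :
    unusedIdx (used.set i true) = (unusedIdx used).filter (fun j => j ≠ i) := by
  unfold unusedIdx
  rw [List.length_set, List.filter_filter]
  apply List.filter_congr
  intro j _
  rw [getD_set_bool used i j hi]
  by_cases h : j = i <;> simp [h]

lemma nodup_unusedIdx (used : List Bool) : (unusedIdx used).Nodup :=
  List.nodup_range.filter _

lemma mem_unusedIdx (used : List Bool) (i : Nat) :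
    i ∈ unusedIdx used ↔ i < used.length ∧ used.getD i false = false := by
  simp [unusedIdx, List.mem_filter]

lemma matchesI_set (bag : List (Int × Int)) (used : List Bool) (v : Int) (i : Nat)
    (hi : i < used.length) :
    matchesI bag (used.set i true) v = (matchesI bag used v).filter (fun j => j ≠ i) := by
  unfold matchesI
  rw [unusedIdx_set used i hi, List.filter_filter, List.filter_filter]
  apply List.filter_congr
  intro j _
  by_cases h : j = i <;> by_cases h2 : stv bag j = v <;> simp [h, h2]

lemma nodup_matchesI (bag : List (Int × Int)) (used : List Bool) (v : Int) :
    (matchesI bag used v).Nodup := (nodup_unusedIdx used).filter _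

lemma mem_matchesI (bag : List (Int × Int)) (used : List Bool) (v : Int) (i : Nat) :
    i ∈ matchesI bag used v ↔ i ∈ unusedIdx used ∧ stv bag i = v := by
  simp [matchesI, List.mem_filter]

lemma numUnused_set (used : List Bool) (i : Nat) (hmem : i ∈ unusedIdx used) :
    numUnused (used.set i true) + 1 = numUnused used := by
  have hi : i < used.length := ((mem_unusedIdx used i).mp hmem).1
  unfold numUnused
  rw [unusedIdx_set used i hi]
  have he : (unusedIdx used).filter (fun j => j ≠ i) = (unusedIdx used).erase i := by
    rw [List.Nodup.erase_eq_filter (nodup_unusedIdx used) i]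
    apply List.filter_congr; intro j _; by_cases hji : j = i <;> simp [hji]
  rw [he, List.length_erase_of_mem hmem]
  have := List.length_pos_of_mem hmem
  omega

-- matchesI is the filter of one list by another predicate family
lemma matchesI_eq_filter (bag : List (Int × Int)) (used : List Bool) (v : Int) :
    matchesI bag used v = (unusedIdx used).filter (fun i => stv bag i = v) := rfl

-- ---------- evaluation lemmas for takeB ----------
lemma takeB_nil (bag : List (Int × Int)) (used : List Bool) :
    takeB bag used [] = (none, [], used) := by
  rw [takeB]
  split
  · rfl
  · next i hq => simp at hq

lemma takeB_concat (bag : List (Int × Int)) (used : List Bool) (q0 : List Nat) (j : Nat) :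
    takeB bag used (q0 ++ [j]) =
      if used.getD j false then takeB bag used q0
      else (some (bag.getD j (0, 0)), q0, used.set j true) := by
  rw [takeB]
  split
  · next hq => simp at hq
  · next i hq =>
    rw [List.getLast?_concat] at hq
    cases hq
    rw [List.dropLast_concat]

-- ---------- takeB against the queue invariant ----------
lemma takeB_of_matches_nil (bag : List (Int × Int)) (used : List Bool) (v : Int)
    (q : List Nat) (h : InvQ bag used v q) (hm : matchesI bag used v = []) :
    ∃ q', takeB bag used q = (none, q', used) ∧ InvQ bag used v q' := by
  induction q using List.reverseRecOn with
  | nil => exact ⟨[], takeB_nil bag used, h⟩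
  | append_singleton q0 j ih =>
    obtain ⟨hnd, hbd, hfl⟩ := h
    rw [hm, List.reverse_append] at hfl
    simp only [List.reverse_cons, List.reverse_nil, List.nil_append, List.cons_append,
      List.filter_cons] at hfl
    rcases hu : used.getD j false with _ | _
    · rw [hu, Bool.not_false, if_pos rfl] at hfl
      cases hfl
    · rw [hu, Bool.not_true] at hfl
      simp only [Bool.false_eq_true, if_false] at hfl
      rw [takeB_concat, if_pos hu]
      exact ih ⟨(List.nodup_append.mp hnd).1, fun i hi => hbd i (by simp [hi]),
        by rw [hm]; exact hfl⟩

lemma takeB_of_matches_cons (bag : List (Int × Int)) (used : List Bool) (v : Int)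
    (q : List Nat) (i : Nat) (t : List Nat) (h : InvQ bag used v q)
    (hm : matchesI bag used v = i :: t) :
    ∃ q', takeB bag used q = (some (bag.getD i (0, 0)), q', used.set i true) ∧
      InvQ bag (used.set i true) v q' := by
  induction q using List.reverseRecOn with
  | nil =>
    obtain ⟨_, _, hfl⟩ := h
    rw [hm] at hfl
    cases hfl
  | append_singleton q0 j ih =>
    obtain ⟨hnd, hbd, hfl⟩ := h
    rw [hm, List.reverse_append] at hfl
    simp only [List.reverse_cons, List.reverse_nil, List.nil_append, List.cons_append,
      List.filter_cons] at hfl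
    have hjlen : j < used.length := (hbd j (by simp)).1
    rcases hu : used.getD j false with _ | _
    · -- j is unused: it is the popped element, j = i
      rw [hu, Bool.not_false, if_pos rfl] at hfl
      injection hfl with hji htail
      subst hji
      refine ⟨q0, ?_, ?_⟩
      · rw [takeB_concat, if_neg (by rw [hu]; exact Bool.false_ne_true)]
      · -- InvQ for the rest of the queue under used.set j true
        have hnotmem : j ∉ q0 :=
          (List.nodup_cons.mp (by simpa using List.nodup_append_comm.mp hnd)).1
        refine ⟨(List.nodup_append.mp hnd).1,
          fun a ha => ⟨by simpa using (hbd a (by simp [ha])).1, (hbd a (by simp [ha])).2⟩, ?_⟩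
        rw [matchesI_set bag used v j hjlen, hm]
        -- LHS: filtering q0.reverse by the new used
        have hcong : q0.reverse.filter (fun a => !(used.set j true).getD a false) =
            q0.reverse.filter (fun a => !used.getD a false) := by
          apply List.filter_congr
          intro a ha
          have haj : a ≠ j := by
            intro haj; subst haj; exact hnotmem (by simpa using ha)
          rw [getD_set_bool used j a hjlen, if_neg haj]
        rw [hcong, htail]
        -- RHS: (i :: t).filter (≠ j) with i = j heads off, t has no j
        have htnd : (matchesI bag used v).Nodup := nodup_matchesI bag used v
        rw [hm] at htnd
        have hjt : j ∉ t := by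
          intro hjt; exact (List.nodup_cons.mp htnd).1 hjt
        simp only [List.filter_cons]
        rw [if_neg (by simp)]
        symm
        apply List.filter_eq_self.mpr
        intro a ha
        simp only [decide_eq_true_eq]
        intro haj; subst haj; exact hjt ha
    · -- j already used: pop it and continue
      rw [hu, Bool.not_true] at hfl
      simp only [Bool.false_eq_true, if_false] at hfl
      obtain ⟨q', hq', hinv⟩ := ih ⟨(List.nodup_append.mp hnd).1,
        fun a ha => hbd a (by simp [ha]), by rw [hm]; exact hfl⟩
      refine ⟨q', ?_, hinv⟩
      rw [takeB_concat, if_pos hu]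
      exact hq'

-- ---------- whole-state invariant manipulation ----------
lemma InvB_insert (bag : List (Int × Int)) (d : PySem.Dict Int (List Nat)) (used : List Bool)
    (v : Int) (q' : List Nat) (hB : InvB bag d used) (hq' : InvQ bag used v q') :
    InvB bag (d.insert v q') used := by
  intro v'
  rw [PySem.Dict.getD_insert]
  split
  · next hvv => subst hvv; exact hq'
  · exact hB v'

lemma InvQ_set_of_ne (bag : List (Int × Int)) (used : List Bool) (v v' : Int) (q : List Nat)
    (i : Nat) (h : InvQ bag used v' q) (hi : i < used.length) (hsv : stv bag i = v)
    (hne : v' ≠ v) : InvQ bag (used.set i true) v' q := by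
  obtain ⟨hnd, hbd, hfl⟩ := h
  have hmemq : i ∉ q := fun hiq => hne ((hbd i hiq).2 ▸ hsv ▸ rfl)
  refine ⟨hnd, fun a ha => ⟨by simpa using (hbd a ha).1, (hbd a ha).2⟩, ?_⟩
  have hcong : q.reverse.filter (fun a => !(used.set i true).getD a false) =
      q.reverse.filter (fun a => !used.getD a false) := by
    apply List.filter_congr
    intro a ha
    have hai : a ≠ i := fun hai => hmemq (hai ▸ (List.mem_reverse.mp ha))
    rw [getD_set_bool used i a hi, if_neg hai]
  rw [hcong, hfl, matchesI_set bag used v' i hi]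
  symm
  apply List.filter_eq_self.mpr
  intro a ha
  simp only [decide_eq_true_eq]
  intro hai
  subst hai
  exact hne ((((mem_matchesI bag used v' a).mp ha).2).symm.trans hsv)

lemma InvB_take_some (bag : List (Int × Int)) (d : PySem.Dict Int (List Nat)) (used : List Bool)
    (v : Int) (q' : List Nat) (i : Nat) (hB : InvB bag d used) (hi : i < used.length)
    (hsv : stv bag i = v) (hq' : InvQ bag (used.set i true) v q') :
    InvB bag (d.insert v q') (used.set i true) := by
  intro v'
  rw [PySem.Dict.getD_insert]
  split
  · next hvv => subst hvv; exact hq'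
  · next hvv => exact InvQ_set_of_ne bag used v v' _ i (hB v') hi hsv hvv

-- ---------- findNextA characterised on the remaining bag ----------
lemma findNextA_eq_none (cur : Int × Int) (l : List (Int × Int))
    (h : ∀ e ∈ l, e.1 ≠ cur.2) : findNextA cur l = none := by
  induction l with
  | nil => rfl
  | cons e rest ih =>
    simp only [findNextA]
    rw [if_neg (fun hh => h e (by simp) hh.symm), ih (fun e' he' => h e' (by simp [he']))]

lemma findNextA_break (cur : Int × Int) (l1 : List (Int × Int)) (e : Int × Int)
    (l2 : List (Int × Int)) (h1 : ∀ f ∈ l1, f.1 ≠ cur.2) (he : e.1 = cur.2) :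
    findNextA cur (l1 ++ e :: l2) = some (e, l1 ++ l2) := by
  induction l1 with
  | nil => simp [findNextA, he]
  | cons f rest ih =>
    simp only [List.cons_append, findNextA]
    rw [if_neg (fun hh => h1 f (by simp) hh.symm),
      ih (fun f' hf' => h1 f' (by simp [hf']))]

-- every element of remE is the edge of the corresponding unused index
lemma mem_remE_start (bag : List (Int × Int)) (used : List Bool) (v : Int)
    (hm : matchesI bag used v = []) : ∀ e ∈ remE bag used, e.1 ≠ v := by
  intro e he
  obtain ⟨i, hi, rfl⟩ := List.mem_map.mp he
  intro hev
  have : i ∈ matchesI bag used v := (mem_matchesI bag used v i).mpr ⟨hi, hev⟩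
  rw [hm] at this
  cases this

-- the first remaining edge starting at v, and the remaining bag after taking it
lemma findNextA_remE (bag : List (Int × Int)) (used : List Bool) (cur : Int × Int)
    (i : Nat) (t : List Nat) (hm : matchesI bag used cur.2 = i :: t) :
    i ∈ unusedIdx used ∧ stv bag i = cur.2 ∧
    findNextA cur (remE bag used) = some (bag.getD i (0, 0), remE bag (used.set i true)) := by
  have hmem : i ∈ matchesI bag used cur.2 := by rw [hm]; simp
  obtain ⟨hiu, hisv⟩ := (mem_matchesI bag used cur.2 i).mp hmem
  refine ⟨hiu, hisv, ?_⟩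
  -- decompose unusedIdx at the first match
  have hsplit := (List.filter_eq_cons_iff).mp (matchesI_eq_filter bag used cur.2 ▸ hm)
  obtain ⟨l1, l2, hldef, hl1, _, _⟩ := hsplit
  have hi : i < used.length := ((mem_unusedIdx used i).mp hiu).1
  have hnd : (unusedIdx used).Nodup := nodup_unusedIdx used
  rw [hldef] at hnd
  have hil1 : i ∉ l1 := (by simpa using List.nodup_middle.mp hnd : (i ∉ l1 ∧ i ∉ l2) ∧ (l1 ++ l2).Nodup).1.1
  have hil2 : i ∉ l2 := (by simpa using List.nodup_middle.mp hnd : (i ∉ l1 ∧ i ∉ l2) ∧ (l1 ++ l2).Nodup).1.2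
  -- remE splits accordingly
  have hrem : remE bag used =
      l1.map (fun j => bag.getD j (0, 0)) ++ (bag.getD i (0, 0)) :: l2.map (fun j => bag.getD j (0, 0)) := by
    rw [remE, hldef]; simp
  rw [hrem, findNextA_break cur _ _ _ ?_ hisv]
  · congr 1
    ext1
    · rfl
    · rw [remE, unusedIdx_set used i hi, hldef]
      rw [List.filter_append, List.filter_cons]
      rw [if_neg (by simp)]
      rw [List.filter_eq_self.mpr (fun a ha => by simp only [decide_eq_true_eq]; intro hai; subst hai; exact hil1 ha),
          List.filter_eq_self.mpr (fun a ha => by simp only [decide_eq_true_eq]; intro hai; subst hai; exact hil2 ha)]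
      simp
  · intro f hf
    obtain ⟨j, hj, rfl⟩ := List.mem_map.mp hf
    have := hl1 j hj
    simp only [decide_eq_true_eq] at this
    exact this

lemma headD_append_ne_nil (l l2 : List (Int × Int)) (d : Int × Int) (h : l ≠ []) :
    (l ++ l2).headD d = l.headD d := by cases l with | nil => exact absurd rfl h | cons a t => rfl

lemma unusedIdx_nil_of_numUnused_zero (used : List Bool) (h : numUnused used = 0) :
    unusedIdx used = [] := List.length_eq_zero_iff.mp h

-- ---------- the chain phase: A's while-body chaining = B's inner loop ----------
lemma chain_sim (k : Nat) : ∀ (bag : List (Int × Int)) (used : List Bool)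
    (d : PySem.Dict Int (List Nat)) (cur : Int × Int) (curLoop : List (Int × Int))
    (startv : Int) (fuel : Nat),
    used.length = bag.length → InvB bag d used → numUnused used ≤ k → k + 1 ≤ fuel →
    curLoop ≠ [] → startv = (curLoop.headD (0, 0)).1 →
    ∃ loop d' used',
      chainB bag startv fuel cur curLoop d used = (loop, d', used') ∧
      loopA cur [] curLoop (remE bag used) = loop :: AloopsFrom bag used' ∧
      InvB bag d' used' ∧ used'.length = bag.length ∧ numUnused used' ≤ numUnused used ∧
      (∀ i, used.getD i false = true → used'.getD i false = true) := by
  induction k with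
  | zero =>
    intro bag used d cur curLoop startv fuel hlen hB hnum hfuel hcl hst
    have hui : unusedIdx used = [] := unusedIdx_nil_of_numUnused_zero used (by omega)
    have hm : matchesI bag used cur.2 = [] := by rw [matchesI_eq_filter, hui]; rfl
    have hrem : remE bag used = [] := by rw [remE, hui]; rfl
    obtain ⟨f, rfl⟩ : ∃ f, fuel = f + 1 := ⟨fuel - 1, by omega⟩
    obtain ⟨q', heq, hinv⟩ := takeB_of_matches_nil bag used cur.2 _ (hB cur.2) hm
    refine ⟨curLoop, d.insert cur.2 q', used, ?_, ?_, InvB_insert bag d used cur.2 q' hB hinv,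
      hlen, le_refl _, fun i h => h⟩
    · simp only [chainB, heq]
    · rw [hrem, loopA_nil]
      simp [AloopsFrom, hrem]
  | succ k' ih =>
    intro bag used d cur curLoop startv fuel hlen hB hnum hfuel hcl hst
    obtain ⟨f, rfl⟩ : ∃ f, fuel = f + 1 := ⟨fuel - 1, by omega⟩
    cases hm : matchesI bag used cur.2 with
    | nil =>
      obtain ⟨q', heq, hinv⟩ := takeB_of_matches_nil bag used cur.2 _ (hB cur.2) hm
      refine ⟨curLoop, d.insert cur.2 q', used, ?_, ?_, InvB_insert bag d used cur.2 q' hB hinv,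
        hlen, le_refl _, fun i h => h⟩
      · simp only [chainB, heq]
      · cases hrem : remE bag used with
        | nil => rw [loopA_nil]; simp [AloopsFrom, hrem]
        | cons e0 bag0 =>
          have hnone : findNextA cur (e0 :: bag0) = none := by
            rw [← hrem]
            exact findNextA_eq_none cur _ (mem_remE_start bag used cur.2 hm)
          rw [loopA_cons_none _ _ _ _ _ hnone, loopA_acc]
          simp [AloopsFrom, hrem]
    | cons i t =>
      obtain ⟨hiu, hisv, hfind⟩ := findNextA_remE bag used cur i t hm
      have hi : i < used.length := ((mem_unusedIdx used i).mp hiu).1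
      obtain ⟨q', heq, hinvq'⟩ := takeB_of_matches_cons bag used cur.2 _ i t (hB cur.2) hm
      have hBset : InvB bag (d.insert cur.2 q') (used.set i true) :=
        InvB_take_some bag d used cur.2 q' i hB hi hisv hinvq'
      have hlenset : (used.set i true).length = bag.length := by simpa using hlen
      have hnumset : numUnused (used.set i true) + 1 = numUnused used := numUnused_set used i hiu
      have hmono : ∀ j, used.getD j false = true → (used.set i true).getD j false = true := by
        intro j hj
        rw [getD_set_bool used i j hi]
        split
        · rfl
        · exact hj
      set e := bag.getD i (0, 0) with hedef
      cases hrem : remE bag used with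
      | nil =>
        rw [hrem] at hfind
        cases hfind
      | cons e0 bag0 =>
        rw [hrem] at hfind
        by_cases hclose : e.2 = startv
        · -- the loop closes (or A returns because the bag is exhausted)
          refine ⟨curLoop ++ [e], d.insert cur.2 q', used.set i true, ?_, ?_, hBset, hlenset,
            by omega, hmono⟩
          · simp only [chainB, heq, if_pos hclose]
          · cases hrem' : remE bag (used.set i true) with
            | nil =>
              rw [hrem'] at hfind
              rw [loopA_cons_some_nil _ _ _ _ _ _ hfind]
              simp [AloopsFrom, hrem']
            | cons e1 r1 =>
              rw [hrem'] at hfind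
              rw [loopA_cons_some_cons _ _ _ _ _ _ _ _ hfind,
                if_pos (by rw [headD_append_ne_nil curLoop [e] _ hcl, ← hst]; exact hclose),
                loopA_acc]
              simp [AloopsFrom, hrem']
        · -- the chain continues with e
          have hstep : loopA cur [] curLoop (e0 :: bag0) =
              loopA e [] (curLoop ++ [e]) (remE bag (used.set i true)) := by
            cases hrem' : remE bag (used.set i true) with
            | nil =>
              rw [hrem'] at hfind
              rw [loopA_cons_some_nil _ _ _ _ _ _ hfind, loopA_nil]
            | cons e1 r1 =>
              rw [hrem'] at hfind
              rw [loopA_cons_some_cons _ _ _ _ _ _ _ _ hfind,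
                if_neg (by rw [headD_append_ne_nil curLoop [e] _ hcl, ← hst]; exact hclose)]
          obtain ⟨loop, d', used', hchain, hA, hB', hlen', hnum', hmono'⟩ :=
            ih bag (used.set i true) (d.insert cur.2 q') e (curLoop ++ [e])
              startv f hlenset hBset (by omega) (by omega) (by simp)
              (by rw [headD_append_ne_nil curLoop [e] _ hcl, hst])
          refine ⟨loop, d', used', ?_, ?_, hB', hlen', by omega, fun j hj => hmono' j (hmono j hj)⟩
          · simp only [chainB, heq, if_neg hclose]
            exact hchain
          · rw [hstep]
            exact hA

-- ---------- the used[] marking of a fresh loop start keeps the invariant ----------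
lemma InvQ_set_any (bag : List (Int × Int)) (used : List Bool) (v : Int) (q : List Nat)
    (p : Nat) (h : InvQ bag used v q) (hp : p < used.length) :
    InvQ bag (used.set p true) v q := by
  obtain ⟨hnd, hbd, hfl⟩ := h
  refine ⟨hnd, fun a ha => ⟨by simpa using (hbd a ha).1, (hbd a ha).2⟩, ?_⟩
  have hcong : q.reverse.filter (fun a => !(used.set p true).getD a false) =
      (q.reverse.filter (fun a => !used.getD a false)).filter (fun a => a ≠ p) := by
    rw [List.filter_filter]
    apply List.filter_congr
    intro a _
    rw [getD_set_bool used p a hp]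
    by_cases hap : a = p <;> simp [hap]
  rw [hcong, hfl, matchesI_set bag used v p hp]

lemma InvB_set_any (bag : List (Int × Int)) (d : PySem.Dict Int (List Nat)) (used : List Bool)
    (p : Nat) (h : InvB bag d used) (hp : p < used.length) :
    InvB bag d (used.set p true) :=
  fun v => InvQ_set_any bag used v _ p (h v) hp

lemma numUnused_le (used : List Bool) : numUnused used ≤ used.length := by
  simpa [numUnused, unusedIdx] using List.length_filter_le (fun i => !used.getD i false) (List.range used.length)

-- at the first unused index p, the remaining bag starts with edge p
lemma unusedIdx_head (used : List Bool) (p : Nat) (hp : p < used.length)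
    (hpu : used.getD p false = false) (hbefore : ∀ i, i < p → used.getD i false = true) :
    unusedIdx used = p :: unusedIdx (used.set p true) := by
  rw [unusedIdx_set used p hp]
  unfold unusedIdx
  have hsplit : List.range used.length = List.range' 0 p ++ List.range' p (used.length - p) := by
    rw [List.range_eq_range']
    have h := @List.range'_append 0 p (used.length - p) 1
    simp only [Nat.one_mul, Nat.mul_one, Nat.zero_add] at h
    rw [show used.length = p + (used.length - p) by omega, ← h, Nat.add_sub_cancel_left]
  have hcons : List.range' p (used.length - p) = p :: List.range' (p + 1) (used.length - p - 1) := by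
    have h : used.length - p = (used.length - p - 1) + 1 := by omega
    rw [h, List.range'_succ]
    simp
  have h1 : (List.range' 0 p).filter (fun i => !used.getD i false) = [] := by
    apply List.filter_eq_nil_iff.mpr
    intro a ha
    have hap : a < p := by simpa using (List.mem_range'_1.mp ha).2
    simp [List.getD_eq_getElem?_getD ▸ hbefore a hap, hbefore a hap]
  rw [hsplit, hcons, List.filter_append, List.filter_cons]
  rw [h1, if_pos (by simp only [List.getD_eq_getElem?_getD] at hpu ⊢; simp [hpu])]
  simp only [List.nil_append, List.cons.injEq, true_and]
  rw [List.filter_cons, if_neg (by simp)]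
  symm
  apply List.filter_eq_self.mpr
  intro a ha
  have ha2 : a ∈ List.range' (p + 1) (used.length - p - 1) := List.mem_of_mem_filter ha
  have : p + 1 ≤ a := (List.mem_range'_1.mp ha2).1
  simp only [decide_eq_true_eq]
  omega

-- ---------- the outer phase: B's pointer scan = A's pop-from-the-front ----------
lemma outer_sim (m : Nat) : ∀ (bag : List (Int × Int)) (used : List Bool)
    (d : PySem.Dict Int (List Nat)) (p : Nat) (loops : List (List (Int × Int))),
    m = bag.length - p → used.length = bag.length → InvB bag d used →
    (∀ i, i < p → used.getD i false = true) →
    outerB bag bag.length p d used loops = loops ++ AloopsFrom bag used := by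
  induction m with
  | zero =>
    intro bag used d p loops hm hlen hB hbefore
    have hnp : ¬ p < bag.length := by omega
    rw [outerB, dif_neg hnp]
    have hui : unusedIdx used = [] := by
      apply List.eq_nil_iff_forall_not_mem.mpr
      intro i hi
      obtain ⟨h1, h2⟩ := (mem_unusedIdx used i).mp hi
      have := hbefore i (by omega)
      rw [this] at h2
      cases h2
    have hrem : remE bag used = [] := by rw [remE, hui]; rfl
    simp [AloopsFrom, hrem]
  | succ m' ih =>
    intro bag used d p loops hm hlen hB hbefore
    by_cases hpn : p < bag.length
    · rcases hu : used.getD p false with _ | _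
      · -- p is a fresh loop start
        have hp : p < used.length := by omega
        have hrem : unusedIdx used = p :: unusedIdx (used.set p true) :=
          unusedIdx_head used p hp hu hbefore
        have hmem : p ∈ unusedIdx used := by rw [hrem]; simp
        have hBset : InvB bag d (used.set p true) := InvB_set_any bag d used p hB hp
        have hnum1 : numUnused (used.set p true) + 1 = numUnused used := numUnused_set used p hmem
        have hnumle : numUnused used ≤ bag.length := hlen ▸ numUnused_le used
        obtain ⟨loop, d', used', hchain, hA, hB', hlen', hnum', hmono'⟩ :=
          chain_sim (numUnused (used.set p true)) bag (used.set p true) d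
            (bag.getD p (0, 0)) [bag.getD p (0, 0)] (bag.getD p (0, 0)).1 bag.length
            (by simpa using hlen) hBset (le_refl _) (by omega) (by simp) (by simp)
        rw [outerB, dif_pos hpn,
          if_neg (by simp only [List.getD_eq_getElem?_getD] at hu ⊢; simp [hu])]
        simp only [hchain]
        rw [ih bag used' d' (p + 1) (loops ++ [loop]) (by omega) hlen' hB' ?later]
        case later =>
          intro i hi
          by_cases hip : i = p
          · subst hip
            apply hmono' i
            rw [getD_set_bool used i i hp, if_pos rfl]
          · apply hmono' i
            rw [getD_set_bool used p i hp, if_neg hip]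
            exact hbefore i (by omega)
        have hAloops : AloopsFrom bag used = loop :: AloopsFrom bag used' := by
          have hremE : remE bag used = bag.getD p (0, 0) :: remE bag (used.set p true) := by
            rw [remE, hrem]; rfl
          simp only [AloopsFrom, hremE]
          exact hA
        rw [hAloops]
        simp
      · -- p already consumed: skip it
        rw [outerB, dif_pos hpn,
          if_pos (by simp only [List.getD_eq_getElem?_getD] at hu ⊢; simp [hu])]
        apply ih bag used d (p + 1) loops (by omega) hlen hB
        intro i hi
        by_cases hip : i = p
        · subst hip; exact hu
        · exact hbefore i (by omega)
    · omega

-- ---------- the initial state ----------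
lemma getD_replicate_false (n j : Nat) : (List.replicate n false).getD j false = false := by
  rcases lt_or_ge j n with h | h
  · simp [List.getD_eq_getElem?_getD, List.getElem?_replicate, h]
  · rw [List.getD_eq_getElem?_getD, List.getElem?_eq_none (by simpa using h)]
    rfl

lemma unusedIdx_replicate (n : Nat) :
    unusedIdx (List.replicate n false) = List.range n := by
  unfold unusedIdx
  rw [List.length_replicate]
  apply List.filter_eq_self.mpr
  intro a _
  simp [getD_replicate_false]

lemma map_getD_range (bag : List (Int × Int)) :
    (List.range bag.length).map (fun i => bag.getD i (0, 0)) = bag := by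
  apply List.ext_getElem
  · simp
  · intro i h1 h2
    simp [List.getD_eq_getElem?_getD, List.getElem?_eq_getElem h2]

lemma remE_replicate (bag : List (Int × Int)) :
    remE bag (List.replicate bag.length false) = bag := by
  rw [remE, unusedIdx_replicate]
  exact map_getD_range bag

lemma buildIdxB_getD (bag : List (Int × Int)) :
    ∀ (is : List Nat) (d : PySem.Dict Int (List Nat)) (v : Int),
    (buildIdxB bag d is).getD v [] = d.getD v [] ++ is.filter (fun i => stv bag i = v) := by
  intro is
  induction is with
  | nil => intro d v; simp [buildIdxB]
  | cons i tl ih =>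
    intro d v
    simp only [buildIdxB]
    rw [ih, List.filter_cons]
    rw [PySem.Dict.getD_insert]
    by_cases hv : v = (bag.getD i (0, 0)).1
    · rw [if_pos hv, if_pos (by simp only [stv, decide_eq_true_eq]; exact hv.symm)]
      rw [← hv]
      simp
    · rw [if_neg hv, if_neg (by simp only [stv, decide_eq_true_eq]; exact fun hh => hv hh.symm)]

lemma InvB_init (bag : List (Int × Int)) :
    InvB bag (buildIdxB bag PySem.Dict.empty (List.range bag.length).reverse)
      (List.replicate bag.length false) := by
  intro v
  rw [buildIdxB_getD bag _ PySem.Dict.empty v]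
  rw [PySem.Dict.getD_empty, List.nil_append]
  rw [List.filter_reverse]
  constructor
  · exact List.nodup_reverse.mpr (List.nodup_range.filter _)
  constructor
  · intro i hi
    rw [List.mem_reverse, List.mem_filter] at hi
    refine ⟨by simpa using List.mem_range.mp hi.1, by simpa using hi.2⟩
  · rw [List.reverse_reverse, matchesI_eq_filter, unusedIdx_replicate]
    apply List.filter_eq_self.mpr
    intro a _
    simp [getD_replicate_false]

-- ===== VERDICT (by name: the statement is the Claim_ definition above) =====
theorem find_edge_loops_spec : Claim_equal_find_edge_loops := by
  intro bag _hdom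
  unfold Spec_find_edge_loops
  cases bag with
  | nil => rfl
  | cons e rest =>
    have hout := outer_sim (e :: rest).length (e :: rest)
        (List.replicate (e :: rest).length false)
        (buildIdxB (e :: rest) PySem.Dict.empty (List.range (e :: rest).length).reverse) 0 []
        (by omega) (by simp) (InvB_init (e :: rest)) (fun i hi => absurd hi (Nat.not_lt_zero i))
    rw [show find_edge_loops (e :: rest) = loopA e [] [e] rest from rfl]
    rw [find_edge_loops_alt, if_neg (by simp)]
    rw [hout, List.nil_append]
    have hrem := remE_replicate (e :: rest)
    simp only [AloopsFrom, hrem]
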